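-- pv_equiv track=rewrite | github.com/anukem/better_developer_resources | interview_questions/python/construct_k_palindromes.py | construct_k_palindromes
-- ===== SOURCE A (Python) =====
-- def construct_k_palindromes(s, k):
--     if k > len(s):
--         return False
--     elif k == len(s):
--         return True
--
--     seen = {}
--
--     for letter in s:
--         seen[letter] = 1 if letter not in seen else seen[letter] + 1
--
--     singles = 0
--     doubles = 0
--     for key, value in seen.items():
--         if value % 2 == 1:
--             singles += 1
--         doubles += value // 2
--
--     return singles < k <= singles + doubles
-- ===== SOURCE B (Python) =====
-- def construct_k_palindromes(s, k):
--     if k > len(s):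
--         return False
--     if k == len(s):
--         return True
--     seen = set()
--     for letter in s:
--         if letter in seen:
--             seen.discard(letter)
--         else:
--             seen.add(letter)
--     singles = len(seen)
--     return singles < k <= (len(s) + singles) // 2
-- ===== Notes on version B (the rewrite author's own statement) =====
-- stated objective: simpler
-- what changed: Replaces the frequency dict plus a second tally loop with a single parity-toggle set pass; the singles/doubles tally is replaced by the closed-form bound singles < k <= (len(s)+singles)//2.
import Mathlib
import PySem

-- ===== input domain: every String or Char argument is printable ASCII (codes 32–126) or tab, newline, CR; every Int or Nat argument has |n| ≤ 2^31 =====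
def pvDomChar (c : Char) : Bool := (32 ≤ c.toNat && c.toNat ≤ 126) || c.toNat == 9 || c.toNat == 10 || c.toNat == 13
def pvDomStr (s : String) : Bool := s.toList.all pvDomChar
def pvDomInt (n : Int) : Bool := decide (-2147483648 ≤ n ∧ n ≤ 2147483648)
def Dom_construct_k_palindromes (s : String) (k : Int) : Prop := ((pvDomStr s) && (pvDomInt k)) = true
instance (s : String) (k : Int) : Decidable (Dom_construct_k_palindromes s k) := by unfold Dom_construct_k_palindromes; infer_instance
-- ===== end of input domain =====

-- B replaces the frequency dict and the second tally loop by a single parity-toggle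
-- set pass and the closed-form bound singles < k <= (len(s)+singles)//2 (objective: simpler).

-- ===== PORT A =====
def construct_k_palindromes (s : String) (k : Int) : Bool :=
  if k > PySem.Str.len s then false
  else if k = PySem.Str.len s then true
  else
    -- seen[letter] = 1 if letter not in seen else seen[letter] + 1
    -- (seen[letter] is read only in the branch where letter is present, so getD is exact)
    let seen : PySem.Dict Char Int :=
      s.toList.foldl
        (fun d letter =>
          d.insert letter (if d.contains letter = false then 1 else d.getD letter 0 + 1))
        PySem.Dict.empty
    let sd : Int × Int :=
      seen.items.foldl
        (fun acc kv =>
          ((if PySem.Int.mod kv.2 2 = 1 then acc.1 + 1 else acc.1),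
           acc.2 + PySem.Int.floordiv kv.2 2))
        (0, 0)
    decide (sd.1 < k) && decide (k ≤ sd.1 + sd.2)

-- ===== PORT B =====
def construct_k_palindromes_alt (s : String) (k : Int) : Bool :=
  if k > PySem.Str.len s then false
  else if k = PySem.Str.len s then true
  else
    let seen : PySem.Set Char :=
      s.toList.foldl
        (fun t letter =>
          if PySem.Set.contains t letter then PySem.Set.discard t letter
          else PySem.Set.add t letter)
        PySem.Set.empty
    let singles : Int := PySem.Set.len seen
    decide (singles < k) && decide (k ≤ PySem.Int.floordiv (PySem.Str.len s + singles) 2)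

-- ===== PRECONDITION & SPEC =====
def Spec_construct_k_palindromes (s : String) (k : Int) (out : Bool) : Prop := out = construct_k_palindromes_alt s k
instance (s : String) (k : Int) (out : Bool) : Decidable (Spec_construct_k_palindromes s k out) := by unfold Spec_construct_k_palindromes; infer_instance

-- ===== CLAIM (what is proved, stated in full; the proofs are below) =====
def Claim_equal_construct_k_palindromes : Prop := ∀ (s : String) (k : Int), Dom_construct_k_palindromes s k → Spec_construct_k_palindromes s k (construct_k_palindromes s k)

-- ===== LEMMAS AND PROOFS =====

-- A's dict-building loop is exactly the running Counter loop.
theorem pv_seen_eq_counter (l : List Char) :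
    l.foldl
      (fun d letter =>
        d.insert letter (if d.contains letter = false then 1 else d.getD letter 0 + 1))
      PySem.Dict.empty = PySem.Dict.counter l := by
  rw [← PySem.Dict.foldl_insert_getD_add_one_eq_counter]
  apply PySem.List.foldl_congr_mem
  intro d x _
  by_cases h : d.contains x = true
  · simp [h]
  · simp only [Bool.not_eq_true] at h
    simp [h, PySem.Dict.getD_of_not_contains d (0 : Int) h]

-- B's toggle loop: the set after the pass is Nodup, and c is in it
-- iff parity flipped, i.e. iff (c was in the start set ↔ c's count is even).
theorem pv_toggle_invariant (l : List Char) (t : PySem.Set Char) (ht : t.Nodup) :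
    (l.foldl
      (fun t letter =>
        if PySem.Set.contains t letter then PySem.Set.discard t letter
        else PySem.Set.add t letter) t).Nodup ∧
    ∀ c, c ∈ l.foldl
      (fun t letter =>
        if PySem.Set.contains t letter then PySem.Set.discard t letter
        else PySem.Set.add t letter) t ↔ ((c ∈ t) ↔ Even (l.count c)) := by
  induction l generalizing t with
  | nil => simp [ht]
  | cons x xs ih =>
    by_cases h : PySem.Set.contains t x = true
    · have hx : x ∈ t := (PySem.Set.contains_iff t x).mp h
      have hif : (if PySem.Set.contains t x then PySem.Set.discard t x
          else PySem.Set.add t x) = PySem.Set.discard t x := if_pos h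
      obtain ⟨hn, hm⟩ := ih (PySem.Set.discard t x) (PySem.Set.nodup_discard t x ht)
      simp only [List.foldl_cons, hif]
      refine ⟨hn, ?_⟩
      intro c
      rw [hm c, PySem.Set.mem_discard]
      by_cases hcx : c = x
      · subst hcx
        simp [hx, List.count_cons_self, Nat.even_add_one]
      · have hcount : (x :: xs).count c = xs.count c := by
          rw [List.count_cons]
          simp [Ne.symm hcx]
        rw [hcount]
        tauto
    · have hx : x ∉ t := fun hm => h ((PySem.Set.contains_iff t x).mpr hm)
      have hif : (if PySem.Set.contains t x then PySem.Set.discard t x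
          else PySem.Set.add t x) = PySem.Set.add t x := if_neg h
      obtain ⟨hn, hm⟩ := ih (PySem.Set.add t x) (PySem.Set.nodup_add t x ht)
      simp only [List.foldl_cons, hif]
      refine ⟨hn, ?_⟩
      intro c
      rw [hm c, PySem.Set.mem_add]
      by_cases hcx : c = x
      · subst hcx
        simp only [List.count_cons_self, Nat.even_add_one]
        tauto
      · have hcount : (x :: xs).count c = xs.count c := by
          rw [List.count_cons]
          simp [Ne.symm hcx]
        rw [hcount]
        tauto

-- a list of naturals: twice the sum of the halves plus the number of odd
-- entries is the total sum
theorem pv_half_sum (ns : List Nat) :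
    2 * (ns.map (· / 2)).sum + ns.countP (fun n => n % 2 == 1) = ns.sum := by
  induction ns with
  | nil => simp
  | cons n ns ih =>
    simp only [List.map_cons, List.sum_cons, List.countP_cons]
    by_cases h : n % 2 = 1 <;> simp [h] <;> omega

-- the distinct elements of l (as a PySem.Set) are a permutation of Mathlib's dedup
theorem pv_ofList_perm_dedup (l : List Char) : (PySem.Set.ofList l).Perm l.dedup := by
  rw [List.perm_ext_iff_of_nodup (PySem.Set.nodup_ofList l) l.nodup_dedup]
  intro a
  rw [PySem.Set.mem_ofList, List.mem_dedup]

theorem pv_sum_counts (l : List Char) :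
    ((PySem.Set.ofList l).map (fun c => l.count c)).sum = l.length := by
  rw [List.Perm.sum_eq (List.Perm.map _ (pv_ofList_perm_dedup l))]
  exact List.sum_map_count_dedup_eq_length l

-- summing a Nat-valued map cast to Int is the cast of the Nat sum
theorem pv_sum_cast (xs : List Char) (f : Char → Nat) :
    (xs.map (fun a => ((f a : Nat) : Int))).sum = ((xs.map f).sum : Nat) := by
  induction xs with
  | nil => simp
  | cons x xs ih => simp [ih]

-- the toggle set's size is the number of distinct odd-count characters
theorem pv_toggle_length (l : List Char) :
    (l.foldl
      (fun t letter =>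
        if PySem.Set.contains t letter then PySem.Set.discard t letter
        else PySem.Set.add t letter) PySem.Set.empty).length
      = (PySem.Set.ofList l).countP (fun c => l.count c % 2 == 1) := by
  obtain ⟨hn, hm⟩ := pv_toggle_invariant l PySem.Set.empty (by simp [PySem.Set.empty])
  rw [List.countP_eq_length_filter]
  apply List.Perm.length_eq
  rw [List.perm_ext_iff_of_nodup hn (List.Nodup.filter _ (PySem.Set.nodup_ofList l))]
  intro c
  rw [hm c, List.mem_filter, PySem.Set.mem_ofList]
  have hempty : (c ∈ (PySem.Set.empty : PySem.Set Char)) = False := by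
    simp [PySem.Set.empty]
  rw [hempty]
  constructor
  · intro hiff
    have hodd : ¬ Even (l.count c) := fun h => (hiff.mpr h).elim
    have h1 : l.count c % 2 = 1 := Nat.odd_iff.mp (Nat.not_even_iff_odd.mp hodd)
    exact ⟨List.count_pos_iff.mp (by omega), by simpa using h1⟩
  · rintro ⟨_, hp⟩
    have h1 : l.count c % 2 = 1 := by simpa using hp
    constructor
    · intro h; exact h.elim
    · intro hev; rw [Nat.even_iff] at hev; omega

-- ===== VERDICT (by name: the statement is the Claim_ definition above) =====
theorem construct_k_palindromes_spec : Claim_equal_construct_k_palindromes := by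
  intro s k _
  unfold Spec_construct_k_palindromes construct_k_palindromes construct_k_palindromes_alt
  by_cases h1 : k > PySem.Str.len s
  · rw [if_pos h1, if_pos h1]
  rw [if_neg h1, if_neg h1]
  by_cases h2 : k = PySem.Str.len s
  · rw [if_pos h2, if_pos h2]
  rw [if_neg h2, if_neg h2]
  dsimp only
  set l := s.toList with hl
  -- A side: the dict is the counter, its items enumerate the distinct chars with counts
  rw [pv_seen_eq_counter l, PySem.Dict.items_counter l]
  -- split A's pair fold into the two independent accumulators
  rw [PySem.List.foldl_prod_mk
      (f := fun acc (kv : Char × Int) => if PySem.Int.mod kv.2 2 = 1 then acc + 1 else acc)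
      (g := fun acc (kv : Char × Int) => acc + PySem.Int.floordiv kv.2 2)]
  rw [PySem.List.foldl_ite_add_one, PySem.List.foldl_add]
  -- the two folds, expressed through Nat-side quantities on the distinct characters
  have hsingles :
      (((PySem.Set.ofList l).map (fun c => (c, (l.count c : Int)))).countP
        (fun kv => decide (PySem.Int.mod kv.2 2 = 1)))
        = (PySem.Set.ofList l).countP (fun c => l.count c % 2 == 1) := by
    rw [List.countP_map]
    apply List.countP_congr
    intro c _
    have hmod : PySem.Int.mod ((l.count c : Nat) : Int) 2 = ((l.count c % 2 : Nat) : Int) := by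
      exact_mod_cast PySem.Int.mod_natCast (l.count c) 2
    simp only [Function.comp, hmod, decide_eq_true_eq, beq_iff_eq]
    omega
  have hdoubles :
      ((((PySem.Set.ofList l).map (fun c => (c, (l.count c : Int)))).map
        (fun kv => PySem.Int.floordiv kv.2 2)).sum : Int)
        = (((PySem.Set.ofList l).map (fun c => l.count c / 2)).sum : Nat) := by
    rw [List.map_map]
    have : ((fun kv : Char × Int => PySem.Int.floordiv kv.2 2) ∘ fun c => (c, (l.count c : Int)))
        = fun c => ((l.count c / 2 : Nat) : Int) := by
      funext c
      exact_mod_cast PySem.Int.floordiv_natCast (l.count c) 2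
    rw [this]
    exact pv_sum_cast (PySem.Set.ofList l) (fun c => l.count c / 2)
  -- B side: the toggle set's size
  have hlen : (PySem.Set.len
      (l.foldl (fun t letter =>
        if PySem.Set.contains t letter then PySem.Set.discard t letter
        else PySem.Set.add t letter) PySem.Set.empty) : Int)
      = ((PySem.Set.ofList l).countP (fun c => l.count c % 2 == 1) : Nat) := by
    simp only [PySem.Set.len, pv_toggle_length l]
  rw [hsingles, hdoubles, hlen]
  -- Str.len = length of the char list
  have hslen : PySem.Str.len s = (l.length : Int) := by
    rw [hl]; simp [pysem]
  rw [hslen]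
  -- the closed-form bound: singles + doubles = (len + singles) // 2
  have hkey := pv_half_sum ((PySem.Set.ofList l).map (fun c => l.count c))
  rw [List.map_map, List.countP_map] at hkey
  simp only [Function.comp_def] at hkey
  have hsum := pv_sum_counts l
  rw [hsum] at hkey
  set cnt := (PySem.Set.ofList l).countP (fun c => l.count c % 2 == 1) with hcnt
  set hv := ((PySem.Set.ofList l).map (fun c => l.count c / 2)).sum with hhv
  have hkey' : 2 * hv + cnt = l.length := hkey
  have hfd : PySem.Int.floordiv ((l.length : Int) + (cnt : Nat)) 2 = (0 : Int) + cnt + hv := by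
    have h2 : ((l.length : Int) + (cnt : Nat)) = (((l.length + cnt : Nat)) : Int) := by push_cast; ring
    rw [h2]
    have h3 : PySem.Int.floordiv (((l.length + cnt : Nat)) : Int) 2 = (((l.length + cnt) / 2 : Nat) : Int) := by
      exact_mod_cast PySem.Int.floordiv_natCast (l.length + cnt) 2
    rw [h3]
    have h4 : (l.length + cnt) / 2 = cnt + hv := by omega
    rw [h4]; push_cast; ring
  rw [hfd]
  simp only [zero_add]
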